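-- pv_equiv track=rewrite | github.com/CoffeeStraw/PyonFX | examples/tutorials/2_intermediate/02_shapes.py | generate_oscillating_transforms
-- ===== SOURCE A (Python) =====
-- def generate_oscillating_transforms(
--     start_time: int, end_time: int, cycle_duration: int, tags1: str, tags2: str
-- ) -> str:
--     """Generate a string of oscillating \\t transformations between two sets of tags.
--
--     Alternates tags1/tags2 every half of cycle_duration, from start_time to end_time.
--     """
--     duration = end_time - start_time
--     if duration <= 0 or cycle_duration <= 0:
--         return ""
--
--     half_cycle = cycle_duration // 2
--     transforms = []
--
--     # We step through each full cycle
--     for current_time in range(0, duration, cycle_duration):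
--         first_half_end = min(current_time + half_cycle, duration)
--         second_half_end = min(current_time + cycle_duration, duration)
--
--         # First half: to tags1
--         if first_half_end > current_time:
--             transforms.append(
--                 f"\\t({start_time + current_time},{start_time + first_half_end},{tags1})"
--             )
--         # Second half: to tags2
--         if second_half_end > first_half_end:
--             transforms.append(
--                 f"\\t({start_time + first_half_end},{start_time + second_half_end},{tags2})"
--             )
--
--     return "".join(transforms)
-- ===== SOURCE B (Python) =====
-- def generate_oscillating_transforms(
--     start_time: int, end_time: int, cycle_duration: int, tags1: str, tags2: str
-- ) -> str:
--     """Flat walk over alternating half-segments with a cursor and a toggle."""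
--     duration = end_time - start_time
--     if duration <= 0 or cycle_duration <= 0:
--         return ""
--
--     half_cycle = cycle_duration // 2
--     out = ""
--     t = 0
--     use1 = True
--     while t < duration:
--         seg = half_cycle if use1 else cycle_duration - half_cycle
--         nxt = min(t + seg, duration)
--         if nxt > t:
--             tag = tags1 if use1 else tags2
--             out += f"\\t({start_time + t},{start_time + nxt},{tag})"
--         use1 = not use1
--         t = nxt
--     return out
-- ===== Notes on version B (the rewrite author's own statement) =====
-- stated objective: alternative
-- what changed: Replaces the per-cycle loop that appends two tokens per range step and joins a list at the end by a single flat cursor-and-toggle walk over alternating half-segments that concatenates each token directly onto an output string.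
import Mathlib
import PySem

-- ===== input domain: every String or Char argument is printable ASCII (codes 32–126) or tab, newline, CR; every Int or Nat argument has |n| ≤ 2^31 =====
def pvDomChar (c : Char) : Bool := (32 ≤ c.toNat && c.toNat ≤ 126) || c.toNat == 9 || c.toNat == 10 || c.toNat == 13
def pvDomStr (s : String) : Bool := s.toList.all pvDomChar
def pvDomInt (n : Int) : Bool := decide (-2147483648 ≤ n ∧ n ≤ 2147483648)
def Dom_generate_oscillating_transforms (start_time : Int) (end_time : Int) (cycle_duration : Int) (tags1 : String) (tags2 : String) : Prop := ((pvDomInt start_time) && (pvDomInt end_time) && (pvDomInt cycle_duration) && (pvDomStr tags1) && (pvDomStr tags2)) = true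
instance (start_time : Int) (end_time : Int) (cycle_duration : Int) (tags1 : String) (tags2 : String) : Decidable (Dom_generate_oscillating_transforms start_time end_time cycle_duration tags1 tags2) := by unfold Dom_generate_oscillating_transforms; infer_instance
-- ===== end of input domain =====

-- B replaces A's per-cycle loop (two conditional appends per range(0,duration,cycle) step,
-- joined at the end) by a single flat cursor-and-toggle walk over alternating half-segments
-- that concatenates each token directly onto the output string (objective: alternative).

-- ===== PORT A =====
def generate_oscillating_transforms (start_time : Int) (end_time : Int) (cycle_duration : Int) (tags1 : String) (tags2 : String) : String :=
  let duration := end_time - start_time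
  if duration ≤ 0 ∨ cycle_duration ≤ 0 then ""
  else
    let half_cycle := PySem.Int.floordiv cycle_duration 2
    let transforms : List String :=
      (PySem.List.pyRange 0 duration cycle_duration).foldl
        (fun transforms current_time =>
          let first_half_end := min (current_time + half_cycle) duration
          let second_half_end := min (current_time + cycle_duration) duration
          let transforms :=
            if first_half_end > current_time then
              transforms ++ ["\\t(" ++ PySem.Int.toStr (start_time + current_time) ++ "," ++
                PySem.Int.toStr (start_time + first_half_end) ++ "," ++ tags1 ++ ")"]
            else transforms
          if second_half_end > first_half_end then
            transforms ++ ["\\t(" ++ PySem.Int.toStr (start_time + first_half_end) ++ "," ++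
              PySem.Int.toStr (start_time + second_half_end) ++ "," ++ tags2 ++ ")"]
          else transforms)
        []
    PySem.Str.join "" transforms

-- ===== PORT B =====
-- the while-loop of Source B: cursor t, toggle use1, string accumulator out.
-- fuel is only a structural bound on the number of iterations (each full cycle advances
-- the cursor by cycle_duration ≥ 1, and takes two iterations); it never changes the value.
def pvOscLoop (start_time : Int) (duration : Int) (cycle_duration : Int) (half_cycle : Int)
    (tags1 : String) (tags2 : String) : Nat → Int → Bool → String → String
  | 0, _, _, out => out
  | fuel + 1, t, use1, out =>
    if t < duration then
      let seg := if use1 then half_cycle else cycle_duration - half_cycle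
      let nxt := min (t + seg) duration
      let out' :=
        if nxt > t then
          out ++ ("\\t(" ++ PySem.Int.toStr (start_time + t) ++ "," ++
            PySem.Int.toStr (start_time + nxt) ++ "," ++ (if use1 then tags1 else tags2) ++ ")")
        else out
      pvOscLoop start_time duration cycle_duration half_cycle tags1 tags2 fuel nxt (!use1) out'
    else out

def generate_oscillating_transforms_alt (start_time : Int) (end_time : Int) (cycle_duration : Int) (tags1 : String) (tags2 : String) : String :=
  let duration := end_time - start_time
  if duration ≤ 0 ∨ cycle_duration ≤ 0 then ""
  else
    pvOscLoop start_time duration cycle_duration (PySem.Int.floordiv cycle_duration 2)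
      tags1 tags2 (2 * duration.toNat + 2) 0 true ""

-- ===== PRECONDITION & SPEC =====
def Spec_generate_oscillating_transforms (start_time : Int) (end_time : Int) (cycle_duration : Int) (tags1 : String) (tags2 : String) (out : String) : Prop := out = generate_oscillating_transforms_alt start_time end_time cycle_duration tags1 tags2
instance (start_time : Int) (end_time : Int) (cycle_duration : Int) (tags1 : String) (tags2 : String) (out : String) : Decidable (Spec_generate_oscillating_transforms start_time end_time cycle_duration tags1 tags2 out) := by unfold Spec_generate_oscillating_transforms; infer_instance

-- ===== CLAIM (what is proved, stated in full; the proofs are below) =====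
def Claim_equal_generate_oscillating_transforms : Prop := ∀ (start_time : Int) (end_time : Int) (cycle_duration : Int) (tags1 : String) (tags2 : String), Dom_generate_oscillating_transforms start_time end_time cycle_duration tags1 tags2 → Spec_generate_oscillating_transforms start_time end_time cycle_duration tags1 tags2 (generate_oscillating_transforms start_time end_time cycle_duration tags1 tags2)

-- ===== LEMMAS AND PROOFS =====

-- String facts via toList
lemma pvStr_eq_of_toList {a b : String} (h : a.toList = b.toList) : a = b := by
  have := congrArg String.ofList h; simpa using this
lemma pvStrApp_empty_left (a : String) : "" ++ a = a := by
  apply pvStr_eq_of_toList; simp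

lemma pvStrApp_assoc (a b c : String) : a ++ b ++ c = a ++ (b ++ c) := by
  apply pvStr_eq_of_toList; simp

-- "".join
lemma pvJoin0_nil : PySem.Str.join "" [] = "" := by
  apply pvStr_eq_of_toList
  simp [PySem.Str.toList_join, PySem.Chars.join_nil]

lemma pvJoin0_cons (x : String) (l : List String) :
    PySem.Str.join "" (x :: l) = x ++ PySem.Str.join "" l := by
  apply pvStr_eq_of_toList
  cases l with
  | nil =>
    simp [PySem.Str.toList_join, PySem.Chars.join_singleton, PySem.Chars.join_nil]
  | cons y r =>
    simp [PySem.Str.toList_join, PySem.Chars.join_cons_cons]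

lemma pvJoin0_append (l1 l2 : List String) :
    PySem.Str.join "" (l1 ++ l2) = PySem.Str.join "" l1 ++ PySem.Str.join "" l2 := by
  induction l1 with
  | nil => simp [pvJoin0_nil]
  | cons x r ih => simp [pvJoin0_cons, ih, pvStrApp_assoc]

-- pyRange with a positive step
lemma pvPyRange_nil_of_pos (a b s : Int) (hs : 0 < s) (h : b ≤ a) :
    PySem.List.pyRange a b s = [] := by
  rw [PySem.List.pyRange_of_pos _ _ hs, if_neg (by omega)]
  simp

lemma pvPyRange_cons_of_pos (a b s : Int) (hs : 0 < s) (h : a < b) :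
    PySem.List.pyRange a b s = a :: PySem.List.pyRange (a + s) b s := by
  rw [PySem.List.pyRange_of_pos _ _ hs, PySem.List.pyRange_of_pos _ _ hs, if_pos h]
  have hN : (b - a + s - 1) / s = (if a + s < b then (b - (a + s) + s - 1) / s else 0) + 1 := by
    split_ifs with h2
    · have h3 : b - a + s - 1 = (b - (a + s) + s - 1) + 1 * s := by ring
      rw [h3, Int.add_mul_ediv_right _ _ (by omega : s ≠ 0)]
    · have h4 : PySem.Int.floordiv (b - a + s - 1) s = 1 := by
        rw [PySem.Int.floordiv_eq_iff_of_pos (by omega)]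
        omega
      have h5 : PySem.Int.floordiv (b - a + s - 1) s = (b - a + s - 1) / s :=
        PySem.Int.floordiv_eq_ediv_of_pos (by omega)
      omega
  have hpos : 0 ≤ (if a + s < b then (b - (a + s) + s - 1) / s else 0) := by
    split_ifs with h2
    · exact Int.ediv_nonneg (by omega) (by omega)
    · omega
  have htN : ((b - a + s - 1) / s).toNat
      = ((if a + s < b then (b - (a + s) + s - 1) / s else 0)).toNat + 1 := by omega
  have hsw : ((if a + s < b then (b - (a + s) + s - 1) / s else 0)).toNat
      = (if a + s < b then ((b - (a + s) + s - 1) / s).toNat else 0) := by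
    split_ifs <;> simp
  rw [htN, hsw, List.range_succ_eq_map, List.map_cons, List.map_map]
  refine congrArg₂ List.cons (by push_cast; ring) ?_
  apply List.map_congr_left
  intro k _
  simp only [Function.comp]
  push_cast
  ring

-- the two tokens A emits for the cycle starting at ct
def pvTokA (start_time duration cycle_duration half_cycle : Int) (tags1 tags2 : String) (ct : Int) : List String :=
  (if min (ct + half_cycle) duration > ct then
      ["\\t(" ++ PySem.Int.toStr (start_time + ct) ++ "," ++
        PySem.Int.toStr (start_time + min (ct + half_cycle) duration) ++ "," ++ tags1 ++ ")"]
    else []) ++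
  (if min (ct + cycle_duration) duration > min (ct + half_cycle) duration then
      ["\\t(" ++ PySem.Int.toStr (start_time + min (ct + half_cycle) duration) ++ "," ++
        PySem.Int.toStr (start_time + min (ct + cycle_duration) duration) ++ "," ++ tags2 ++ ")"]
    else [])

lemma pvFoldA (start_time duration cycle_duration half_cycle : Int) (tags1 tags2 : String)
    (l : List Int) (acc : List String) :
    l.foldl
      (fun transforms current_time =>
        let first_half_end := min (current_time + half_cycle) duration
        let second_half_end := min (current_time + cycle_duration) duration
        let transforms :=
          if first_half_end > current_time then
            transforms ++ ["\\t(" ++ PySem.Int.toStr (start_time + current_time) ++ "," ++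
              PySem.Int.toStr (start_time + first_half_end) ++ "," ++ tags1 ++ ")"]
          else transforms
        if second_half_end > first_half_end then
          transforms ++ ["\\t(" ++ PySem.Int.toStr (start_time + first_half_end) ++ "," ++
            PySem.Int.toStr (start_time + second_half_end) ++ "," ++ tags2 ++ ")"]
        else transforms)
      acc
    = acc ++ l.flatMap (pvTokA start_time duration cycle_duration half_cycle tags1 tags2) := by
  have hbody : (fun (transforms : List String) (current_time : Int) =>
        let first_half_end := min (current_time + half_cycle) duration
        let second_half_end := min (current_time + cycle_duration) duration
        let transforms :=
          if first_half_end > current_time then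
            transforms ++ ["\\t(" ++ PySem.Int.toStr (start_time + current_time) ++ "," ++
              PySem.Int.toStr (start_time + first_half_end) ++ "," ++ tags1 ++ ")"]
          else transforms
        if second_half_end > first_half_end then
          transforms ++ ["\\t(" ++ PySem.Int.toStr (start_time + first_half_end) ++ "," ++
            PySem.Int.toStr (start_time + second_half_end) ++ "," ++ tags2 ++ ")"]
        else transforms)
      = fun transforms ct =>
          transforms ++ pvTokA start_time duration cycle_duration half_cycle tags1 tags2 ct := by
    funext transforms ct
    simp only [pvTokA]
    split_ifs <;> simp [List.append_assoc]
  rw [hbody, PySem.List.foldl_append_eq_flatMap]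

-- B's loop, started tags1-aligned at cursor t with enough fuel, produces exactly A's remaining cycles
lemma pvLoop_eq (start_time duration cycle_duration half_cycle : Int) (tags1 tags2 : String)
    (hc : 0 < cycle_duration) (hh : half_cycle = PySem.Int.floordiv cycle_duration 2) :
    ∀ (n fuel : Nat) (t : Int) (out : String),
      (duration - t).toNat ≤ n → 2 * (duration - t).toNat + 2 ≤ fuel →
      pvOscLoop start_time duration cycle_duration half_cycle tags1 tags2 fuel t true out
        = out ++ PySem.Str.join ""
            ((PySem.List.pyRange t duration cycle_duration).flatMap
              (pvTokA start_time duration cycle_duration half_cycle tags1 tags2)) := by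
  have hh2 : half_cycle = cycle_duration / 2 := by
    rw [hh]; exact PySem.Int.floordiv_eq_ediv_of_pos (by omega)
  have hhalf0 : 0 ≤ half_cycle := by omega
  have hhalf1 : half_cycle < cycle_duration := by omega
  intro n
  induction n with
  | zero =>
    intro fuel t out hle hfuel
    have hdt : duration ≤ t := by omega
    obtain ⟨f, rfl⟩ : ∃ f, fuel = f + 1 := ⟨fuel - 1, by omega⟩
    rw [pvOscLoop, if_neg (by omega), pvPyRange_nil_of_pos _ _ _ (by omega) hdt]
    simp [pvJoin0_nil]
  | succ n ih =>
    intro fuel t out hle hfuel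
    by_cases h : t < duration
    · obtain ⟨f, rfl⟩ : ∃ f, fuel = f + 1 + 1 := ⟨fuel - 2, by omega⟩
      rw [pvOscLoop, if_pos h]
      simp only [ite_true, Bool.not_true]
      by_cases hA : duration ≤ t + half_cycle
      · -- the first half reaches duration: one token and the loop stops
        have hmin : min (t + half_cycle) duration = duration := by omega
        rw [hmin, pvOscLoop, if_neg (by omega), if_pos h,
          pvPyRange_cons_of_pos _ _ _ (by omega) h,
          pvPyRange_nil_of_pos _ _ _ (by omega) (by omega : duration ≤ t + cycle_duration)]
        simp only [List.flatMap_cons, List.flatMap_nil, List.append_nil, pvTokA, hmin]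
        have hm2 : min (t + cycle_duration) duration = duration := by omega
        rw [if_pos h, hm2, if_neg (lt_irrefl duration)]
        simp [pvJoin0_cons, pvJoin0_nil, pvStrApp_assoc]
      · -- full first half, then a nonempty second half, then recurse
        have hB : t + half_cycle < duration := by omega
        have hmin : min (t + half_cycle) duration = t + half_cycle := by omega
        rw [hmin, pvOscLoop, if_pos hB]
        simp only [Bool.false_eq_true, ite_false, Bool.not_false]
        have harith : t + half_cycle + (cycle_duration - half_cycle) = t + cycle_duration := by ring
        rw [harith]
        have hcond2 : t + half_cycle < min (t + cycle_duration) duration := by omega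
        rw [if_pos hcond2]
        rw [ih f (min (t + cycle_duration) duration) _ (by omega) (by omega)]
        rw [pvPyRange_cons_of_pos _ _ _ (by omega) h]
        simp only [List.flatMap_cons, pvJoin0_append]
        have htail : PySem.List.pyRange (min (t + cycle_duration) duration) duration cycle_duration
            = PySem.List.pyRange (t + cycle_duration) duration cycle_duration := by
          by_cases hc2 : t + cycle_duration < duration
          · rw [min_eq_left (by omega)]
          · rw [min_eq_right (by omega),
              pvPyRange_nil_of_pos _ _ _ (by omega) le_rfl,
              pvPyRange_nil_of_pos _ _ _ (by omega) (by omega)]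
        rw [htail]
        simp only [pvTokA, hmin, if_pos hcond2]
        by_cases hhz : t < t + half_cycle
        · rw [if_pos hhz, if_pos hhz]
          simp [pvJoin0_cons, pvJoin0_nil, pvStrApp_assoc]
        · rw [if_neg hhz, if_neg hhz]
          simp [pvJoin0_cons, pvJoin0_nil, pvStrApp_assoc]
    · have hdt : duration ≤ t := by omega
      obtain ⟨f, rfl⟩ : ∃ f, fuel = f + 1 := ⟨fuel - 1, by omega⟩
      rw [pvOscLoop, if_neg (by omega), pvPyRange_nil_of_pos _ _ _ (by omega) hdt]
      simp [pvJoin0_nil]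

-- ===== VERDICT (by name: the statement is the Claim_ definition above) =====
theorem generate_oscillating_transforms_spec : Claim_equal_generate_oscillating_transforms := by
  intro start_time end_time cycle_duration tags1 tags2 _
  unfold Spec_generate_oscillating_transforms
  unfold generate_oscillating_transforms generate_oscillating_transforms_alt
  by_cases h : end_time - start_time ≤ 0 ∨ cycle_duration ≤ 0
  · simp only [if_pos h]
  · simp only [if_neg h]
    rw [pvFoldA]
    rw [pvLoop_eq start_time (end_time - start_time) cycle_duration
      (PySem.Int.floordiv cycle_duration 2) tags1 tags2 (by omega) rfl
      ((end_time - start_time - 0).toNat) (2 * (end_time - start_time).toNat + 2) 0 ""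
      (by omega) (by omega)]
    rw [pvStrApp_empty_left]
    simp
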